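-- pv_equiv track=rewrite | github.com/benjibrown/txtr | texitor/core/keybinds.py | normalizeKeySequence
-- ===== SOURCE A (Python) =====
-- _NAMED_KEYS = {
--     "escape", "enter", "tab", "backspace", "up", "down", "left", "right",
--     "space", "home", "end", "pageup", "pagedown", "delete", "insert",
-- }
--
-- _MODIFIERS = ("ctrl", "shift", "alt", "meta", "super")
--
-- def normalizeKeySequence(seq):
--     seq = (seq or "").strip()
--     if not seq:
--         return ""
--     if " " not in seq and "+" not in seq and len(seq) > 1 and seq.lower() not in _NAMED_KEYS:
--         seq = " ".join(seq)
--     parts = []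
--     for token in seq.split():
--         parts.append(_normalizeToken(token))
--     return " ".join(parts)
--
-- def _normalizeToken(token):
--     token = token.strip()
--     if "+" in token:
--         pieces = [part.strip().lower() for part in token.split("+") if part.strip()]
--         mods = [part for part in pieces if part in _MODIFIERS]
--         keys = [part for part in pieces if part not in _MODIFIERS]
--         return "+".join(mods + keys)
--     lower = token.lower()
--     if lower in _NAMED_KEYS:
--         return lower
--     return token
-- ===== SOURCE B (Python) =====
-- # B: one-pass token handler — instead of building a pieces list and running two
-- # filter passes (mods, keys) that are concatenated, B scans token.split("+")
-- # ONCE, maintaining an output list and a running modifier count: a modifier is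
-- # inserted at position nmods (end of the modifier prefix), a key is appended.
-- _NAMED_KEYS = {
--     "escape", "enter", "tab", "backspace", "up", "down", "left", "right",
--     "space", "home", "end", "pageup", "pagedown", "delete", "insert",
-- }
--
-- _MODIFIERS = ("ctrl", "shift", "alt", "meta", "super")
--
-- def normalizeKeySequence(seq):
--     seq = (seq or "").strip()
--     if not seq:
--         return ""
--     if " " not in seq and "+" not in seq and len(seq) > 1 and seq.lower() not in _NAMED_KEYS:
--         seq = " ".join(seq)
--     return " ".join(_tokenOnePass(token) for token in seq.split())
--
-- def _tokenOnePass(token):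
--     token = token.strip()
--     if "+" not in token:
--         lower = token.lower()
--         return lower if lower in _NAMED_KEYS else token
--     out = []
--     nmods = 0
--     for part in token.split("+"):
--         part = part.strip()
--         if not part:
--             continue
--         p = part.lower()
--         if p in _MODIFIERS:
--             out.insert(nmods, p)
--             nmods += 1
--         else:
--             out.append(p)
--     return "+".join(out)
-- ===== Notes on version B (the rewrite author's own statement) =====
-- stated objective: alternative
-- what changed: The token handler's staged passes (build a pieces list, filter modifiers, filter keys, concatenate) are replaced by one pass over token.split('+') that maintains an output list and a running modifier count, inserting each modifier at the end of the modifier prefix and appending keys.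
import Mathlib
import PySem

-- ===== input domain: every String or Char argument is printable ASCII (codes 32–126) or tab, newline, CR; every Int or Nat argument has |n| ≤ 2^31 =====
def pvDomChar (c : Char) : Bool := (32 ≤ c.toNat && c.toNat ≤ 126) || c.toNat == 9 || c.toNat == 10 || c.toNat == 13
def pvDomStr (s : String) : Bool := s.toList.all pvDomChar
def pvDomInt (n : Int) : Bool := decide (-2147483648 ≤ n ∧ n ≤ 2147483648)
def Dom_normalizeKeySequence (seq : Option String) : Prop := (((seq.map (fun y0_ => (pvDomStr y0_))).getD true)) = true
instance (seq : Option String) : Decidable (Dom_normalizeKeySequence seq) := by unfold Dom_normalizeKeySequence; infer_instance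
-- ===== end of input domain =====

set_option maxHeartbeats 1000000


-- B replaces the token handler's staged passes (pieces list, modifier filter, key filter, concatenation)
-- by ONE pass with an output list and a running modifier count (alternative decomposition; same behaviour).

-- ===== PORT A =====
def pvNamedKeys : PySem.Set String := PySem.Set.ofList
  ["escape", "enter", "tab", "backspace", "up", "down", "left", "right",
   "space", "home", "end", "pageup", "pagedown", "delete", "insert"]

def pvModifiers : List String := ["ctrl", "shift", "alt", "meta", "super"]

def pvNormalizeToken (token : String) : String :=
  let token := PySem.Str.strip token
  if PySem.Str.isIn "+" token then
    let pieces := (((PySem.Str.split? token "+").getD []).filter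
        (fun part => !(PySem.Str.strip part == ""))).map
        (fun part => PySem.Str.lower (PySem.Str.strip part))
    let mods := pieces.filter (fun part => pvModifiers.contains part)
    let keys := pieces.filter (fun part => !(pvModifiers.contains part))
    PySem.Str.join "+" (mods ++ keys)
  else
    let lower := PySem.Str.lower token
    if PySem.Set.contains pvNamedKeys lower then lower else token

def normalizeKeySequence (seq : Option String) : String :=
  let s := PySem.Str.strip (seq.getD "")
  if s == "" then ""
  else
    let s := if !(PySem.Str.isIn " " s) && !(PySem.Str.isIn "+" s)
                && decide (1 < PySem.Str.len s)
                && !(PySem.Set.contains pvNamedKeys (PySem.Str.lower s))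
             then PySem.Str.join " " (s.toList.map (fun c => String.ofList [c]))
             else s
    PySem.Str.join " " ((PySem.Str.split₀ s).map pvNormalizeToken)

-- ===== PORT B =====
-- one pass: modifiers are list.insert-ed at position nmods, keys appended
def pvTokenOnePass (token : String) : String :=
  let token := PySem.Str.strip token
  if !(PySem.Str.isIn "+" token) then
    let lower := PySem.Str.lower token
    if PySem.Set.contains pvNamedKeys lower then lower else token
  else
    let st := ((PySem.Str.split? token "+").getD []).foldl
      (fun (st : List String × Int) part =>
        let part := PySem.Str.strip part
        if part == "" then st
        else
          let p := PySem.Str.lower part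
          if pvModifiers.contains p then (PySem.List.insert st.1 st.2 p, st.2 + 1)
          else (st.1 ++ [p], st.2))
      ([], 0)
    PySem.Str.join "+" st.1

def normalizeKeySequence_alt (seq : Option String) : String :=
  let s := PySem.Str.strip (seq.getD "")
  if s == "" then ""
  else
    let s := if !(PySem.Str.isIn " " s) && !(PySem.Str.isIn "+" s)
                && decide (1 < PySem.Str.len s)
                && !(PySem.Set.contains pvNamedKeys (PySem.Str.lower s))
             then PySem.Str.join " " (s.toList.map (fun c => String.ofList [c]))
             else s
    PySem.Str.join " " ((PySem.Str.split₀ s).map pvTokenOnePass)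

-- ===== PRECONDITION & SPEC =====
def Spec_normalizeKeySequence (seq : Option String) (out : String) : Prop := out = normalizeKeySequence_alt seq
instance (seq : Option String) (out : String) : Decidable (Spec_normalizeKeySequence seq out) := by unfold Spec_normalizeKeySequence; infer_instance

-- ===== CLAIM (what is proved, stated in full; the proofs are below) =====
def Claim_equal_normalizeKeySequence : Prop := ∀ (seq : Option String), Dom_normalizeKeySequence seq → Spec_normalizeKeySequence seq (normalizeKeySequence seq)

-- ===== LEMMAS AND PROOFS =====

-- names for the proofs only (the ports use the inline expressions; foldl with pvStep is defeq)
def pvStep (st : List String × Int) (part : String) : List String × Int :=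
  let part := PySem.Str.strip part
  if part == "" then st
  else
    let p := PySem.Str.lower part
    if pvModifiers.contains p then (PySem.List.insert st.1 st.2 p, st.2 + 1)
    else (st.1 ++ [p], st.2)

def pvPieces (parts : List String) : List String :=
  (parts.filter (fun part => !(PySem.Str.strip part == ""))).map
    (fun part => PySem.Str.lower (PySem.Str.strip part))

def pvMods (parts : List String) : List String :=
  (pvPieces parts).filter (fun p => pvModifiers.contains p)

def pvKeys (parts : List String) : List String :=
  (pvPieces parts).filter (fun p => !(pvModifiers.contains p))

-- inserting at the exact boundary of a known prefix splits it there
theorem insert_at_prefix (M K : List String) (p : String) :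
    PySem.List.insert (M ++ K) (M.length : Int) p = M ++ p :: K := by
  rw [PySem.List.insert_natCast (M ++ K) M.length p (by simp)]
  simp

theorem pieces_cons (part : String) (rest : List String) :
    pvPieces (part :: rest) = if (PySem.Str.strip part == "") = true then pvPieces rest
      else PySem.Str.lower (PySem.Str.strip part) :: pvPieces rest := by
  by_cases hb : (PySem.Str.strip part == "") = true
  · simp only [pvPieces, List.filter_cons, hb, Bool.not_true, Bool.false_eq_true, if_false, if_true]
  · have hb' : (PySem.Str.strip part == "") = false := by simpa using hb
    simp only [pvPieces, List.filter_cons, hb', Bool.not_false, Bool.false_eq_true, if_false, if_true, List.map_cons]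

-- the one-pass fold keeps the state (modifier-prefix ++ keys, length of the prefix)
theorem fold_inv (parts : List String) : ∀ (M K : List String),
    parts.foldl pvStep (M ++ K, (M.length : Int))
      = ((M ++ pvMods parts) ++ (K ++ pvKeys parts), ((M ++ pvMods parts).length : Int)) := by
  induction parts with
  | nil => intro M K; simp [pvMods, pvKeys, pvPieces]
  | cons part rest ih =>
    intro M K
    by_cases hblank : PySem.Str.strip part = ""
    · have hb : (PySem.Str.strip part == "") = true := by simp [hblank]
      have hstep : pvStep (M ++ K, (M.length : Int)) part = (M ++ K, (M.length : Int)) := by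
        simp [pvStep, hb]
      rw [List.foldl_cons, hstep, ih M K]
      simp only [pvMods, pvKeys, pieces_cons, hb, if_true]
    · have hb : (PySem.Str.strip part == "") = false := by simp [hblank]
      by_cases hmod : pvModifiers.contains (PySem.Str.lower (PySem.Str.strip part)) = true
      · have hstep : pvStep (M ++ K, (M.length : Int)) part
            = ((M ++ [PySem.Str.lower (PySem.Str.strip part)]) ++ K,
               (((M ++ [PySem.Str.lower (PySem.Str.strip part)]).length : Int))) := by
          simp only [pvStep, hb, hmod, Bool.false_eq_true, if_false, if_true]
          rw [insert_at_prefix]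
          simp
        rw [List.foldl_cons, hstep, ih (M ++ [PySem.Str.lower (PySem.Str.strip part)]) K]
        simp only [pvMods, pvKeys, pieces_cons, hb, Bool.false_eq_true, if_false, List.filter_cons,
          hmod, Bool.not_true, if_true, List.append_assoc, List.singleton_append]
      · have hmod' : pvModifiers.contains (PySem.Str.lower (PySem.Str.strip part)) = false := by
          simpa using hmod
        have hstep : pvStep (M ++ K, (M.length : Int)) part
            = (M ++ (K ++ [PySem.Str.lower (PySem.Str.strip part)]), (M.length : Int)) := by
          simp only [pvStep, hb, hmod', Bool.false_eq_true, if_false, List.append_assoc]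
        rw [List.foldl_cons, hstep, ih M (K ++ [PySem.Str.lower (PySem.Str.strip part)])]
        simp only [pvMods, pvKeys, pieces_cons, hb, Bool.false_eq_true, if_false, List.filter_cons,
          hmod', Bool.not_false, if_true, List.append_assoc, List.singleton_append]

theorem fold_lambda (parts : List String) :
    parts.foldl
      (fun (st : List String × Int) part =>
        let part := PySem.Str.strip part
        if part == "" then st
        else
          let p := PySem.Str.lower part
          if pvModifiers.contains p then (PySem.List.insert st.1 st.2 p, st.2 + 1)
          else (st.1 ++ [p], st.2))
      ([], 0)
    = (pvMods parts ++ pvKeys parts, ((pvMods parts).length : Int)) := by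
  have h := fold_inv parts [] []
  simp only [List.nil_append, List.length_nil, Nat.cast_zero] at h
  exact h

theorem token_eq (token : String) : pvNormalizeToken token = pvTokenOnePass token := by
  unfold pvNormalizeToken pvTokenOnePass
  cases hb : PySem.Str.isIn "+" (PySem.Str.strip token) with
  | false => simp only [hb, Bool.not_false, if_true, Bool.false_eq_true, if_false]
  | true =>
    simp only [hb, Bool.not_true, Bool.false_eq_true, if_false, if_true]
    rw [fold_lambda]
    simp [pvMods, pvKeys, pvPieces]

-- ===== VERDICT (by name: the statement is the Claim_ definition above) =====
theorem normalizeKeySequence_spec : Claim_equal_normalizeKeySequence := by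
  intro seq _
  unfold Spec_normalizeKeySequence normalizeKeySequence normalizeKeySequence_alt
  rw [funext token_eq]
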